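-- pv_equiv track=rewrite | github.com/derekwins88/Brain-Engine-SDK | brain_engine/bridges/clause_logic.py | to_cnf
-- ===== SOURCE A (Python) =====
-- def clause_truth_table(motif: str) -> dict[str, bool]:
--     # Minimal illustrative mapping; extend as you formalize
--     table = {
--         "collapse_warning::distort": {"np_wall": True, "no_recovery": True, "sat_shape": False},
--         "reversal::clean": {"np_wall": False, "no_recovery": False, "sat_shape": True},
--         "volatility_surge::texture": {"np_wall": True, "no_recovery": False, "sat_shape": False},
--         "stabilization::drone": {"np_wall": False, "no_recovery": True, "sat_shape": True},
--     }
--     return table.get(motif, {"np_wall": False, "no_recovery": False, "sat_shape": False})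
--
-- def to_cnf(motifs: list[str]) -> tuple[int, list[list[int]]]:  # DIMACS-ish stub
--     # Encode booleans as variables: 1=np_wall, 2=no_recovery, 3=sat_shape
--     # Build CNF from motif votes (very simplified)
--     votes = {"np_wall": 0, "no_recovery": 0, "sat_shape": 0}
--     for m in motifs:
--         tbl = clause_truth_table(m)
--         for k, v in tbl.items():
--             votes[k] += 1 if v else -1
--     # Majority vote -> unit clauses
--     clauses: list[list[int]] = []
--     clauses.append([1 if votes["np_wall"] >= 0 else -1])
--     clauses.append([2 if votes["no_recovery"] >= 0 else -2])
--     clauses.append([3 if votes["sat_shape"] >= 0 else -3])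
--     return 3, clauses
-- ===== SOURCE B (Python) =====
-- # B: three independent per-variable majority counts (2*count_true >= len) instead of one fused signed-vote dict pass.
-- _TRUE_NP = {"collapse_warning::distort", "volatility_surge::texture"}
-- _TRUE_NR = {"collapse_warning::distort", "stabilization::drone"}
-- _TRUE_SS = {"reversal::clean", "stabilization::drone"}
--
-- def to_cnf(motifs: list[str]) -> tuple[int, list[list[int]]]:
--     n = len(motifs)
--
--     def unit(var, true_set):
--         c = sum(1 for m in motifs if m in true_set)
--         return [var] if 2 * c >= n else [-var]
--
--     return 3, [unit(1, _TRUE_NP), unit(2, _TRUE_NR), unit(3, _TRUE_SS)]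
-- ===== Notes on version B (the rewrite author's own statement) =====
-- stated objective: faster
-- what changed: Replaces the fused signed-vote dict accumulation (a truth-table dict built per motif, inner loop over its items, dict updates) with three independent per-variable counts of True votes compared as 2*count >= len(motifs).
import Mathlib
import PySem

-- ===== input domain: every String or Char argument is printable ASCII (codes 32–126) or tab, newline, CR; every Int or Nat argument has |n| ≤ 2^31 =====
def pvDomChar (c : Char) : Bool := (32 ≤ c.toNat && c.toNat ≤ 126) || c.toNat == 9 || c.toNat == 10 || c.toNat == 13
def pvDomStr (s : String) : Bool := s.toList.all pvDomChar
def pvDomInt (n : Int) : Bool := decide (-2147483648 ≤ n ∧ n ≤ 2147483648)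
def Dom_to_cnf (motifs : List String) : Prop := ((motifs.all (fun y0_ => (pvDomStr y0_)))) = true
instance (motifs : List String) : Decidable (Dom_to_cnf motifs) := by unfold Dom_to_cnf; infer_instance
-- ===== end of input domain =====

-- B computes each of the three majority votes independently (2*count_true >= len) instead of A's
-- fused per-motif truth-table dict pass; same values everywhere (objective: faster by constant factor).

-- ===== PORT A =====
-- table.get(motif, default) on the literal table dict
def clause_truth_table (motif : String) : PySem.Dict String Bool :=
  let table : PySem.Dict String (PySem.Dict String Bool) := PySem.Dict.mk
    [ ("collapse_warning::distort", PySem.Dict.mk [("np_wall", true), ("no_recovery", true), ("sat_shape", false)])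
    , ("reversal::clean", PySem.Dict.mk [("np_wall", false), ("no_recovery", false), ("sat_shape", true)])
    , ("volatility_surge::texture", PySem.Dict.mk [("np_wall", true), ("no_recovery", false), ("sat_shape", false)])
    , ("stabilization::drone", PySem.Dict.mk [("np_wall", false), ("no_recovery", true), ("sat_shape", true)]) ]
  table.getD motif (PySem.Dict.mk [("np_wall", false), ("no_recovery", false), ("sat_shape", false)])

-- loop body: 'for k, v in tbl.items(): votes[k] += 1 if v else -1'
-- (votes[k] read ported as getD 0: every key of tbl is present in votes, so Python never raises here)
def voteStep (votes : PySem.Dict String Int) (m : String) : PySem.Dict String Int :=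
  (clause_truth_table m).items.foldl
    (fun votes kv => votes.insert kv.1 (votes.getD kv.1 0 + (if kv.2 then 1 else -1))) votes

def to_cnf (motifs : List String) : Int × List (List Int) :=
  let votes : PySem.Dict String Int :=
    motifs.foldl voteStep (PySem.Dict.mk [("np_wall", 0), ("no_recovery", 0), ("sat_shape", 0)])
  let clauses : List (List Int) :=
    [ [if votes.getD "np_wall" 0 ≥ 0 then (1 : Int) else -1]
    , [if votes.getD "no_recovery" 0 ≥ 0 then (2 : Int) else -2]
    , [if votes.getD "sat_shape" 0 ≥ 0 then (3 : Int) else -3] ]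
  (3, clauses)

-- ===== PORT B =====
def trueNP : List String := PySem.Set.ofList ["collapse_warning::distort", "volatility_surge::texture"]
def trueNR : List String := PySem.Set.ofList ["collapse_warning::distort", "stabilization::drone"]
def trueSS : List String := PySem.Set.ofList ["reversal::clean", "stabilization::drone"]

def unitClause (motifs : List String) (n : Int) (var : Int) (trueSet : List String) : List Int :=
  let c : Int := motifs.countP (fun m => trueSet.contains m)
  if 2 * c ≥ n then [var] else [-var]

def to_cnf_alt (motifs : List String) : Int × List (List Int) :=
  let n : Int := motifs.length
  (3, [unitClause motifs n 1 trueNP, unitClause motifs n 2 trueNR, unitClause motifs n 3 trueSS])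

-- ===== PRECONDITION & SPEC =====
def Spec_to_cnf (motifs : List String) (out : Int × List (List Int)) : Prop := out = to_cnf_alt motifs
instance (motifs : List String) (out : Int × List (List Int)) : Decidable (Spec_to_cnf motifs out) := by unfold Spec_to_cnf; infer_instance

-- ===== CLAIM (what is proved, stated in full; the proofs are below) =====
def Claim_equal_to_cnf : Prop := ∀ (motifs : List String), Dom_to_cnf motifs → Spec_to_cnf motifs (to_cnf motifs)

-- ===== LEMMAS AND PROOFS =====

-- one voteStep on the three-entry votes dict, per branch of the truth table (definitional)
lemma voteStep_cw (a b c : Int) :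
    voteStep (PySem.Dict.mk [("np_wall", a), ("no_recovery", b), ("sat_shape", c)]) "collapse_warning::distort" =
    PySem.Dict.mk [("np_wall", a + 1), ("no_recovery", b + 1), ("sat_shape", c + -1)] := rfl

lemma voteStep_rc (a b c : Int) :
    voteStep (PySem.Dict.mk [("np_wall", a), ("no_recovery", b), ("sat_shape", c)]) "reversal::clean" =
    PySem.Dict.mk [("np_wall", a + -1), ("no_recovery", b + -1), ("sat_shape", c + 1)] := rfl

lemma voteStep_vs (a b c : Int) :
    voteStep (PySem.Dict.mk [("np_wall", a), ("no_recovery", b), ("sat_shape", c)]) "volatility_surge::texture" =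
    PySem.Dict.mk [("np_wall", a + 1), ("no_recovery", b + -1), ("sat_shape", c + -1)] := rfl

lemma voteStep_ss (a b c : Int) :
    voteStep (PySem.Dict.mk [("np_wall", a), ("no_recovery", b), ("sat_shape", c)]) "stabilization::drone" =
    PySem.Dict.mk [("np_wall", a + -1), ("no_recovery", b + 1), ("sat_shape", c + 1)] := rfl

lemma voteStep_other (a b c : Int) (m : String) (h1 : m ≠ "collapse_warning::distort")
    (h2 : m ≠ "reversal::clean") (h3 : m ≠ "volatility_surge::texture") (h4 : m ≠ "stabilization::drone") :
    voteStep (PySem.Dict.mk [("np_wall", a), ("no_recovery", b), ("sat_shape", c)]) m =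
    PySem.Dict.mk [("np_wall", a + -1), ("no_recovery", b + -1), ("sat_shape", c + -1)] := by
  have hc : clause_truth_table m = PySem.Dict.mk [("np_wall", false), ("no_recovery", false), ("sat_shape", false)] := by
    simp [clause_truth_table, PySem.Dict.getD_eq_get?_getD, Ne.symm h1, Ne.symm h2, Ne.symm h3,
      Ne.symm h4, PySem.Dict.get?]
  simp [voteStep, hc, PySem.Dict.getD, PySem.Dict.get?, PySem.Dict.insert]

-- invariant of A's fold: votes keep their three-entry shape, each value the signed vote sum,
-- expressed through B's counts (signed sum = 2*count_true - length)
lemma foldA_votes (motifs : List String) (a b c : Int) :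
    motifs.foldl voteStep (PySem.Dict.mk [("np_wall", a), ("no_recovery", b), ("sat_shape", c)]) =
      PySem.Dict.mk
        [ ("np_wall", a + 2 * (motifs.countP (fun m => trueNP.contains m) : Int) - motifs.length)
        , ("no_recovery", b + 2 * (motifs.countP (fun m => trueNR.contains m) : Int) - motifs.length)
        , ("sat_shape", c + 2 * (motifs.countP (fun m => trueSS.contains m) : Int) - motifs.length) ] := by
  induction motifs generalizing a b c with
  | nil => simp
  | cons m rest ih =>
    simp only [List.foldl_cons]
    by_cases h1 : m = "collapse_warning::distort"
    · subst h1; rw [voteStep_cw, ih]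
      simp [trueNP, trueNR, trueSS, PySem.Set.ofList]
      refine ⟨by ring, by ring, by ring⟩
    · by_cases h2 : m = "reversal::clean"
      · subst h2; rw [voteStep_rc, ih]
        simp [trueNP, trueNR, trueSS, PySem.Set.ofList]
        refine ⟨by ring, by ring, by ring⟩
      · by_cases h3 : m = "volatility_surge::texture"
        · subst h3; rw [voteStep_vs, ih]
          simp [trueNP, trueNR, trueSS, PySem.Set.ofList]
          refine ⟨by ring, by ring, by ring⟩
        · by_cases h4 : m = "stabilization::drone"
          · subst h4; rw [voteStep_ss, ih]
            simp [trueNP, trueNR, trueSS, PySem.Set.ofList]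
            refine ⟨by ring, by ring, by ring⟩
          · rw [voteStep_other a b c m h1 h2 h3 h4, ih]
            simp [trueNP, trueNR, trueSS, PySem.Set.ofList, h1, h2, h3, h4]
            refine ⟨by ring, by ring, by ring⟩

-- ===== VERDICT (by name: the statement is the Claim_ definition above) =====
theorem to_cnf_spec : Claim_equal_to_cnf := by
  intro motifs _
  unfold Spec_to_cnf to_cnf to_cnf_alt unitClause
  rw [foldA_votes]
  simp [PySem.Dict.getD, PySem.Dict.get?]
  refine ⟨by split <;> rfl, by split <;> rfl, by split <;> rfl⟩
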